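-- pv_equiv track=rewrite | github.com/flipcoder/textbeat | src/parser.py | peel_roman_s
-- ===== SOURCE A (Python) =====
-- def peel_roman_s(s, d=None):
--     nums = 'ivx'
--     r = ''
--     case = -1 # -1 unknown, 0 low, 1 uppper
--     for ch in s:
--         chl = ch.lower()
--         chcase = (chl==ch)
--         if chl in nums:
--             if case > 0 and case != chcase:
--                 break # changing case ends peel
--             r += ch
--             chcase = 0 if (chl==ch) else 1
--         else:
--             break
--     if not r: return (d,0) if d!=None else ('',0)
--     return (r,len(r))
-- ===== SOURCE B (Python) =====
-- def peel_roman_s(s, d=None):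
--     rest = s.lstrip('IVXivx')
--     n = len(s) - len(rest)
--     if n == 0:
--         return (d, 0) if d is not None else ('', 0)
--     return (s[:n], n)
-- ===== Notes on version B (the rewrite author's own statement) =====
-- stated objective: idiomatic
-- what changed: Replaces A's explicit character loop with its dead case-tracking state machine by a single str.lstrip call over the Roman-numeral letter set plus a slice, dispatching on the length of the stripped prefix.
import Mathlib
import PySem

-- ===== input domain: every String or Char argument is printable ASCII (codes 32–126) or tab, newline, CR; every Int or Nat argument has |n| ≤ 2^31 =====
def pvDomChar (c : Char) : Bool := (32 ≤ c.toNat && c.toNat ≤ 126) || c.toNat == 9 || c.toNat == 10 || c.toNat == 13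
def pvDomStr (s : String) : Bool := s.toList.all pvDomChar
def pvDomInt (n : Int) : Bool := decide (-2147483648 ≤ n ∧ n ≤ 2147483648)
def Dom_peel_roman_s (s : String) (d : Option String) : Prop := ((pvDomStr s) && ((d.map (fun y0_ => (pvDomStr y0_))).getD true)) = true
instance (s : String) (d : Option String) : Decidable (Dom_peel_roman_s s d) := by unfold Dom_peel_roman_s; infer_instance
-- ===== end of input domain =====

-- ===== PORT A =====
-- B replaces A's character loop (with its dead case-tracking state) by a single
-- str.lstrip call that strips the leading run of Roman-numeral letters (idiomatic).
-- the for-loop with break: case is threaded but never reassigned (as in the Python)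
def pvRomanLoopA : List Char → List Char → Int → List Char
  | [], r, _case => r
  | ch :: rest, r, case =>
    let chl := PySem.Chars.lowerChar ch
    let chcase : Bool := chl == ch
    if PySem.Chars.isIn [chl] ['i', 'v', 'x'] then
      -- Python compares the int `case` with the bool `chcase` (bool counts as 0/1)
      if case > 0 && case != (if chcase then (1 : Int) else 0) then r
      else
        -- r += ch; the reassignment `chcase = 0 if (chl==ch) else 1` is dead
        -- (case is never updated), so it leaves no state to thread
        pvRomanLoopA rest (r ++ [ch]) case
    else r

def peel_roman_s (s : String) (d : Option String) : String × Int :=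
  let r := pvRomanLoopA s.toList [] (-1)
  if r = [] then (match d with | some x => (x, 0) | none => ("", 0))
  else (String.ofList r, (r.length : Int))

-- ===== PORT B =====
def peel_roman_s_alt (s : String) (d : Option String) : String × Int :=
  -- s.lstrip('IVXivx') ported by hand as dropWhile over the char set
  -- (exact: lstrip(chars) removes exactly the leading chars belonging to the set)
  let rest := s.toList.dropWhile (fun c => c ∈ (['I', 'V', 'X', 'i', 'v', 'x'] : List Char))
  let n : Int := (s.toList.length : Int) - (rest.length : Int)
  if n = 0 then (match d with | some x => (x, 0) | none => ("", 0))
  else (PySem.Str.slice s none (some n), n)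

-- ===== PRECONDITION & SPEC =====
def Spec_peel_roman_s (s : String) (d : Option String) (out : String × Int) : Prop := out = peel_roman_s_alt s d
instance (s : String) (d : Option String) (out : String × Int) : Decidable (Spec_peel_roman_s s d out) := by unfold Spec_peel_roman_s; infer_instance

-- ===== CLAIM (what is proved, stated in full; the proofs are below) =====
def Claim_equal_peel_roman_s : Prop := ∀ (s : String) (d : Option String), Dom_peel_roman_s s d → Spec_peel_roman_s s d (peel_roman_s s d)

-- ===== LEMMAS AND PROOFS =====
-- On the ASCII domain, 'ch.lower() in "ivx"' is exactly membership of ch in IVXivx.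
lemma pv_char_key (c : Char) (h : pvDomChar c = true) :
    PySem.Chars.isIn [PySem.Chars.lowerChar c] ['i', 'v', 'x'] =
      decide (c ∈ (['I', 'V', 'X', 'i', 'v', 'x'] : List Char)) := by
  have hb : c.toNat ≤ 126 := by simp [pvDomChar] at h; omega
  have aux : ∀ n : Fin 127,
      PySem.Chars.isIn [PySem.Chars.lowerChar (Char.ofNat n)] ['i', 'v', 'x'] =
        decide (Char.ofNat n ∈ (['I', 'V', 'X', 'i', 'v', 'x'] : List Char)) := by decide
  simpa [Char.ofNat_toNat] using aux ⟨c.toNat, by omega⟩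

-- A's loop at case = -1 (it is never reassigned) peels exactly the leading Roman run.
lemma pv_loopA_eq (cs : List Char) (r : List Char)
    (h : ∀ c ∈ cs, pvDomChar c = true) :
    pvRomanLoopA cs r (-1) =
      r ++ cs.takeWhile (fun c => decide (c ∈ (['I', 'V', 'X', 'i', 'v', 'x'] : List Char))) := by
  induction cs generalizing r with
  | nil => simp [pvRomanLoopA]
  | cons ch rest ih =>
    have hch := h ch (List.mem_cons_self ..)
    have hrest : ∀ c ∈ rest, pvDomChar c = true := fun c hc => h c (List.mem_cons_of_mem _ hc)
    simp only [pvRomanLoopA, pv_char_key ch hch, List.takeWhile_cons]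
    by_cases hm : ch ∈ (['I', 'V', 'X', 'i', 'v', 'x'] : List Char)
    · simp [hm, ih _ hrest]
    · simp [hm]

lemma pv_take_takeWhile (l : List Char) (p : Char → Bool) :
    l.take (l.takeWhile p).length = l.takeWhile p :=
  (List.prefix_iff_eq_take.mp (List.takeWhile_prefix p)).symm

-- ===== VERDICT (by name: the statement is the Claim_ definition above) =====
theorem peel_roman_s_spec : Claim_equal_peel_roman_s := by
  intro s d hdom
  have hall : ∀ c ∈ s.toList, pvDomChar c = true := by
    simp [Dom_peel_roman_s, pvDomStr, List.all_eq_true] at hdom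
    exact fun c hc => hdom.1 c hc
  show peel_roman_s s d = peel_roman_s_alt s d
  unfold peel_roman_s peel_roman_s_alt
  rw [pv_loopA_eq s.toList [] hall]
  set p : Char → Bool := fun c => decide (c ∈ (['I', 'V', 'X', 'i', 'v', 'x'] : List Char)) with hp
  have hlen : (s.toList.takeWhile p).length + (s.toList.dropWhile p).length = s.toList.length := by
    rw [← List.length_append, List.takeWhile_append_dropWhile]
  have hdw : s.toList.dropWhile (fun c => c ∈ (['I', 'V', 'X', 'i', 'v', 'x'] : List Char)) =
      s.toList.dropWhile p := rfl
  simp only [List.nil_append, String.length_toList]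
  by_cases he : s.toList.takeWhile p = []
  · have : ((s.toList.length : Int) - ((s.toList.dropWhile p).length : Int)) = 0 := by
      rw [← hlen, he]; simp
    rw [String.length_toList] at this
    simp [he, this]
  · have hn : ((s.toList.length : Int) - ((s.toList.dropWhile p).length : Int)) =
        ((s.toList.takeWhile p).length : Int) := by rw [← hlen]; push_cast; ring
    have hne : ((s.toList.takeWhile p).length : Int) ≠ 0 := by
      simpa using fun h0 => he (List.eq_nil_of_length_eq_zero h0)
    rw [← String.length_toList, hn]
    simp only [he, hne, reduceIte]
    refine Prod.ext ?_ rfl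
    apply String.toList_inj.mp
    simp [PySem.Str.slice, PySem.Chars.slice_eq_listSlice, PySem.List.slice_to_natCast,
      pv_take_takeWhile, String.toList_ofList]
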